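-- pv_equiv track=rewrite | github.com/MilanMarocchi/noise-robust-cad-conformer | src/python/heartsignals/processing/segments.py | find_max_ind
-- ===== SOURCE A (Python) =====
-- def find_max_ind(segments, min_len):
--
--     total_length = 0
--     index = 0
--     for i in range(len(segments) - 1, -1, -1):
--         total_length += len(segments[i])
--         if total_length >= min_len:
--             index = i
--             break
--
--     return index
-- ===== SOURCE B (Python) =====
-- def find_max_ind(segments, min_len):
--     total = 0
--     for s in segments:
--         total += len(s)
--     ans = 0
--     cur = total
--     for i, s in enumerate(segments):
--         if cur >= min_len:
--             ans = i
--         else: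
--             break
--         cur -= len(s)
--     return ans
-- ===== Notes on version B (the rewrite author's own statement) =====
-- stated objective: alternative
-- what changed: Replaced the backward scan that accumulates suffix lengths until reaching min_len with a precompute-the-total pass followed by a forward walk that maintains the decreasing suffix sum as a running remainder and records the last index still at or above min_len.
import Mathlib
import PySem

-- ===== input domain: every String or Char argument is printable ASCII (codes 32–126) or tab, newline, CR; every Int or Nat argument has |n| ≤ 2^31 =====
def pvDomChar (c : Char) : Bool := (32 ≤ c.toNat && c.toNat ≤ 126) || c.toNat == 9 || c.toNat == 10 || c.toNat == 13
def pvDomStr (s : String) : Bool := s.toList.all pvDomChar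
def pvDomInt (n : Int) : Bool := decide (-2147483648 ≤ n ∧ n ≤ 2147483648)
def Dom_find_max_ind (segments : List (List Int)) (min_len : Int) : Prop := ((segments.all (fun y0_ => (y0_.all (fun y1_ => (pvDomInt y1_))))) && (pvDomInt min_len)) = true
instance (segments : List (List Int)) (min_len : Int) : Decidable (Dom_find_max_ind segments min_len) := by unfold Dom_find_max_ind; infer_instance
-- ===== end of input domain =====

-- B replaces A's backward accumulate-until-reached scan by a precomputed total plus a
-- forward walk maintaining the suffix sum as a running remainder (alternative decomposition).

-- ===== PORT A =====
-- the 'for i in range(len(segments)-1,-1,-1)' loop with its break; state = total_length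
def findA_loop (segments : List (List Int)) (min_len : Int) : List Int → Int → Int
  | [], _ => 0                                   -- loop ends without break: index stayed 0
  | i :: rest, total_length =>
    let total_length := total_length + (((PySem.List.pyGet? segments i).getD []).length : Int)
    if min_len ≤ total_length then i else findA_loop segments min_len rest total_length

def find_max_ind (segments : List (List Int)) (min_len : Int) : Int :=
  findA_loop segments min_len (PySem.List.pyRange ((segments.length : Int) - 1) (-1) (-1)) 0

-- ===== PORT B =====
-- the 'for i, s in enumerate(segments)' loop with its break; state = (i, cur, ans)
def findB_go (min_len : Int) : List (List Int) → Int → Int → Int → Int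
  | [], _, _, ans => ans
  | s :: rest, i, cur, ans =>
    if min_len ≤ cur then findB_go min_len rest (i + 1) (cur - (s.length : Int)) i
    else ans

def find_max_ind_alt (segments : List (List Int)) (min_len : Int) : Int :=
  let total := segments.foldl (fun acc s => acc + (s.length : Int)) 0
  findB_go min_len segments 0 total 0

-- ===== PRECONDITION & SPEC =====
def Spec_find_max_ind (segments : List (List Int)) (min_len : Int) (out : Int) : Prop := out = find_max_ind_alt segments min_len
instance (segments : List (List Int)) (min_len : Int) (out : Int) : Decidable (Spec_find_max_ind segments min_len out) := by unfold Spec_find_max_ind; infer_instance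

-- ===== CLAIM (what is proved, stated in full; the proofs are below) =====
def Claim_equal_find_max_ind : Prop := ∀ (segments : List (List Int)) (min_len : Int), Dom_find_max_ind segments min_len → Spec_find_max_ind segments min_len (find_max_ind segments min_len)

-- ===== LEMMAS AND PROOFS =====

/-- Suffix-length sum of a list of segments. -/
def suf (l : List (List Int)) : Int := (l.map (fun s => (s.length : Int))).sum

theorem suf_nonneg (l : List (List Int)) : 0 ≤ suf l := by
  induction l with
  | nil => simp [suf]
  | cons s t ih => simp [suf, List.sum_cons] at *; positivity

theorem suf_cons (s : List Int) (t : List (List Int)) :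
    suf (s :: t) = (s.length : Int) + suf t := by simp [suf]

theorem suf_drop_antitone (S : List (List Int)) {j k : Nat} (h : j ≤ k) :
    suf (S.drop k) ≤ suf (S.drop j) := by
  have h1 : List.drop (k - j) (List.drop j S) = List.drop k S := by
    rw [List.drop_drop]; congr 1; omega
  have h2 : List.drop j S
      = List.take (k - j) (List.drop j S) ++ List.drop k S := by
    conv_lhs => rw [← List.take_append_drop (k - j) (List.drop j S)]
    rw [h1]
  have h3 : suf (List.drop j S)
      = suf (List.take (k - j) (List.drop j S)) + suf (List.drop k S) := by
    have := congrArg suf h2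
    simpa [suf] using this
  have := suf_nonneg (List.take (k - j) (List.drop j S))
  omega

theorem suf_drop_eq (S : List (List Int)) {j : Nat} (hj : j < S.length) :
    suf (S.drop j) = (S[j].length : Int) + suf (S.drop (j + 1)) := by
  rw [List.drop_eq_getElem_cons hj, suf_cons]

/-- Reference form of A's backward loop, as structural Nat recursion. -/
def refA (S : List (List Int)) (ml : Int) : Nat → Int
  | 0 => 0
  | m + 1 => if ml ≤ suf (S.drop m) then (m : Int) else refA S ml m

theorem loopA_eq (S : List (List Int)) (ml : Int) :
    ∀ m : Nat, m ≤ S.length →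
      findA_loop S ml (PySem.List.pyRange ((m : Int) - 1) (-1) (-1)) (suf (S.drop m)) = refA S ml m := by
  intro m
  induction m with
  | zero =>
    intro _
    rw [PySem.List.pyRange_neg_one_eq_nil (by norm_num)]
    simp [findA_loop, refA]
  | succ m ih =>
    intro hm
    have hcast : (((m + 1 : Nat) : Int) - 1) = (m : Int) := by push_cast; ring
    rw [hcast, PySem.List.pyRange_neg_one_cons (by omega)]
    have hmlt : m < S.length := hm
    have hget : PySem.List.pyGet? S (m : Int) = some S[m] := by
      simp [PySem.List.pyGet?, PySem.List.pyIdx?, hmlt]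
    show (if ml ≤ suf (S.drop (m+1)) + (((PySem.List.pyGet? S (m : Int)).getD []).length : Int)
          then (m : Int)
          else findA_loop S ml (PySem.List.pyRange ((m : Int) - 1) (-1) (-1))
                 (suf (S.drop (m+1)) + (((PySem.List.pyGet? S (m : Int)).getD []).length : Int)))
        = refA S ml (m + 1)
    have hstep : suf (S.drop (m + 1)) + (((PySem.List.pyGet? S (m : Int)).getD []).length : Int)
        = suf (S.drop m) := by
      rw [hget]
      simp only [Option.getD_some]
      rw [suf_drop_eq S hmlt]; ring
    rw [hstep, refA]
    by_cases hc : ml ≤ suf (S.drop m)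
    · simp [hc]
    · simp [hc, ih (Nat.le_of_succ_le hm)]

theorem refA_succ_eq (S : List (List Int)) (ml : Int) (m : Nat) :
    refA S ml (m + 1) = ((Nat.findGreatest (fun j => ml ≤ suf (S.drop j)) m : Nat) : Int) := by
  induction m with
  | zero => simp [refA, Nat.findGreatest]
  | succ m ih =>
    rw [refA, Nat.findGreatest_succ]
    by_cases hc : ml ≤ suf (S.drop (m + 1))
    · simp [hc]
    · simp [hc, ih]

theorem goB_eq (S : List (List Int)) (ml : Int) :
    ∀ (k j : Nat), j ≤ S.length → S.length - j = k → ∀ ans : Int,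
      findB_go ml (S.drop j) (j : Int) (suf (S.drop j)) ans
        = if ml ≤ suf (S.drop j) ∧ j < S.length
          then ((Nat.findGreatest (fun t => ml ≤ suf (S.drop t)) (S.length - 1) : Nat) : Int)
          else ans := by
  intro k
  induction k with
  | zero =>
    intro j hj hk ans
    have hje : j = S.length := by omega
    subst hje
    simp [findB_go, List.drop_length, suf]
  | succ k ih =>
    intro j hj hk ans
    have hjlt : j < S.length := by omega
    rw [List.drop_eq_getElem_cons hjlt, suf_cons]
    simp only [findB_go]
    by_cases hc : ml ≤ (S[j].length : Int) + suf (S.drop (j + 1))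
    · rw [if_pos hc, if_pos ⟨hc, hjlt⟩]
      have harg : (S[j].length : Int) + suf (S.drop (j + 1)) - (S[j].length : Int)
          = suf (S.drop (j + 1)) := by ring
      have hcast : ((j : Int) + 1) = ((j + 1 : Nat) : Int) := by push_cast; ring
      rw [harg, hcast, ih (j + 1) (by omega) (by omega) (j : Int)]
      by_cases hc2 : ml ≤ suf (S.drop (j + 1)) ∧ j + 1 < S.length
      · rw [if_pos hc2]
      · rw [if_neg hc2]
        have hQj : ml ≤ suf (S.drop j) := by
          rw [suf_drop_eq S hjlt]; exact hc
        have : Nat.findGreatest (fun t => ml ≤ suf (S.drop t)) (S.length - 1) = j := by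
          rcases Nat.lt_or_ge (j + 1) S.length with hlt | hge
          · have hnot : ¬ ml ≤ suf (S.drop (j + 1)) := by tauto
            rw [Nat.findGreatest_eq_iff]
            refine ⟨by omega, fun _ => hQj, ?_⟩
            intro t hjt _ hQ
            exact hnot (le_trans hQ (suf_drop_antitone S (by omega)))
          · have hje : j = S.length - 1 := by omega
            subst hje
            exact Nat.findGreatest_eq hQj
        rw [this]
    · rw [if_neg hc, if_neg (by tauto)]

theorem foldl_len_eq_suf (S : List (List Int)) :
    S.foldl (fun acc s => acc + (s.length : Int)) 0 = suf S := by
  have h : ∀ (l : List (List Int)) (a : Int),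
      l.foldl (fun acc s => acc + (s.length : Int)) a = a + suf l := by
    intro l
    induction l with
    | nil => intro a; simp [suf]
    | cons s t ih => intro a; simp [List.foldl_cons, ih, suf_cons]; ring
  rw [h]; ring

-- ===== VERDICT (by name: the statement is the Claim_ definition above) =====
theorem find_max_ind_spec : Claim_equal_find_max_ind := by
  intro S ml _
  unfold Spec_find_max_ind find_max_ind find_max_ind_alt
  rw [foldl_len_eq_suf]
  have hA : findA_loop S ml (PySem.List.pyRange ((S.length : Int) - 1) (-1) (-1)) 0
      = refA S ml S.length := by
    have := loopA_eq S ml S.length le_rfl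
    simpa [List.drop_length, suf] using this
  have hB := goB_eq S ml S.length 0 (Nat.zero_le _) (by omega) 0
  simp only [List.drop_zero, Nat.cast_zero] at hB
  rw [hA, hB]
  cases hS : S.length with
  | zero =>
    have : S = [] := List.eq_nil_of_length_eq_zero hS
    subst this
    simp [refA, suf]
  | succ n =>
    rw [show S.length = n + 1 from hS] at *
    rw [refA_succ_eq]
    by_cases hc : ml ≤ suf S
    · rw [if_pos ⟨hc, by omega⟩]; simp
    · rw [if_neg (by tauto)]
      have : Nat.findGreatest (fun j => ml ≤ suf (S.drop j)) n = 0 := by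
        rw [Nat.findGreatest_eq_iff]
        refine ⟨Nat.zero_le _, by simp, ?_⟩
        intro t _ _ hQ
        exact hc (le_trans hQ (by simpa using suf_drop_antitone S (Nat.zero_le t)))
      simp [this]
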